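-- pv_equiv track=rewrite | github.com/mohanavamsi20/Shelf_assignment | core/utils.py | identify_shapes
-- ===== SOURCE A (Python) =====
-- def is_square_submatrix(coordinates):
--     # Extract the minimum and maximum coordinates
--     min_x = min(coordinates, key=lambda x: x[0])[0]
--     max_x = max(coordinates, key=lambda x: x[0])[0]
--     min_y = min(coordinates, key=lambda x: x[1])[1]
--     max_y = max(coordinates, key=lambda x: x[1])[1]
--
--     # Calculate the size of the potential square sub-matrix
--     size = max(max_x - min_x, max_y - min_y) + 1
--
--     # Check if all coordinates within the square sub-matrix are present
--     expected_coords = [(r, c) for r in range(min_x, min_x + size)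
--                        for c in range(min_y, min_y + size)]
--     if all(coord in coordinates for coord in expected_coords):
--         return True
--     else:
--         return False
--
-- def identify_shapes(coordinates):
--     shapes = {}
--
--     # Check if the element forms a square sub-matrix
--     if is_square_submatrix(coordinates):
--         shapes['shape'] = 'square'
--
--     # Check if the element forms a horizontal rectangle
--     elif len(set(coord[0] for coord in coordinates)) == 1 and len(set(coord[1] for coord in coordinates)) >= 2:
--         shapes['shape'] = 'horizontal rectangle'
--
--     # Check if the element forms a vertical rectangle
--     elif len(set(coord[1] for coord in coordinates)) == 1 and len(set(coord[0] for coord in coordinates)) >= 2: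
--         shapes['shape'] = 'vertical rectangle'
--
--     # If none of the above conditions are met, consider it a polygon
--     else:
--         shapes['shape'] = 'polygon'
--
--     return shapes
-- ===== SOURCE B (Python) =====
-- def identify_shapes(coordinates):
--     xs = [c[0] for c in coordinates]
--     ys = [c[1] for c in coordinates]
--     min_x, max_x = min(xs), max(xs)
--     min_y, max_y = min(ys), max(ys)
--     size = max(max_x - min_x, max_y - min_y) + 1
--     if len(set(coordinates)) == size * size:
--         shape = 'square'
--     elif min_x == max_x and min_y != max_y:
--         shape = 'horizontal rectangle'
--     elif min_y == max_y and min_x != max_x: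
--         shape = 'vertical rectangle'
--     else:
--         shape = 'polygon'
--     return {'shape': shape}
-- ===== Notes on version B (the rewrite author's own statement) =====
-- stated objective: faster
-- what changed: Replaced the O(size^2) expected-grid enumeration plus per-cell membership scans by a single distinct-count check (the region is a full square iff the number of distinct coordinates equals size*size), and the horizontal/vertical-rectangle set-cardinality tests by direct min/max comparisons, all in one O(n) pass over the data.
import Mathlib
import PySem

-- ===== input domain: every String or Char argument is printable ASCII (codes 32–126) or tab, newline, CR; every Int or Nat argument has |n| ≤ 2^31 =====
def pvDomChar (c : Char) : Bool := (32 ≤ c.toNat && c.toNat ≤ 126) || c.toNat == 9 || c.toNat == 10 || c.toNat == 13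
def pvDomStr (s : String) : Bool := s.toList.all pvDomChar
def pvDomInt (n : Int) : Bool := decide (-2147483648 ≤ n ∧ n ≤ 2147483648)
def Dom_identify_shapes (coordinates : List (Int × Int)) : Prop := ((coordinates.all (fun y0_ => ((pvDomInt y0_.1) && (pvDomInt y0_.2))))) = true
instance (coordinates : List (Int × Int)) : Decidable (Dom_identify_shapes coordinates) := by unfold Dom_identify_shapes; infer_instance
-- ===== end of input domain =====

-- B replaces A's size^2 grid enumeration by a distinct-coordinate count (faster); equivalence is about the return value.

-- ===== PORT A =====
def is_square_submatrix (coordinates : List (Int × Int)) : Bool :=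
  match PySem.List.min? coordinates (fun x => x.1), PySem.List.max? coordinates (fun x => x.1),
        PySem.List.min? coordinates (fun x => x.2), PySem.List.max? coordinates (fun x => x.2) with
  | some mnx, some mxx, some mny, some mxy =>
      let min_x := mnx.1
      let max_x := mxx.1
      let min_y := mny.2
      let max_y := mxy.2
      let size := max (max_x - min_x) (max_y - min_y) + 1
      let expected_coords :=
        (PySem.List.pyRange min_x (min_x + size) 1).flatMap
          (fun r => (PySem.List.pyRange min_y (min_y + size) 1).map (fun c => (r, c)))
      expected_coords.all (fun coord => decide (coord ∈ coordinates))
  | _, _, _, _ => false  -- unreachable under Pre_ (Python raises ValueError on an empty list)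

def identify_shapes (coordinates : List (Int × Int)) : List (String × String) :=
  let shapes : PySem.Dict String String := PySem.Dict.empty
  let shapes :=
    if is_square_submatrix coordinates then
      PySem.Dict.insert shapes "shape" "square"
    else if (PySem.Set.ofList (coordinates.map (fun c => c.1))).length = 1 ∧
            2 ≤ (PySem.Set.ofList (coordinates.map (fun c => c.2))).length then
      PySem.Dict.insert shapes "shape" "horizontal rectangle"
    else if (PySem.Set.ofList (coordinates.map (fun c => c.2))).length = 1 ∧
            2 ≤ (PySem.Set.ofList (coordinates.map (fun c => c.1))).length then
      PySem.Dict.insert shapes "shape" "vertical rectangle"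
    else
      PySem.Dict.insert shapes "shape" "polygon"
  shapes.items

-- ===== PORT B =====
def identify_shapes_alt (coordinates : List (Int × Int)) : List (String × String) :=
  let xs := coordinates.map (fun c => c.1)
  let ys := coordinates.map (fun c => c.2)
  match PySem.List.min? xs (fun v => v), PySem.List.max? xs (fun v => v),
        PySem.List.min? ys (fun v => v), PySem.List.max? ys (fun v => v) with
  | some min_x, some max_x, some min_y, some max_y =>
      let size := max (max_x - min_x) (max_y - min_y) + 1
      let shape : String :=
        if ((PySem.Set.ofList coordinates).length : Int) = size * size then "square"
        else if min_x = max_x ∧ min_y ≠ max_y then "horizontal rectangle"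
        else if min_y = max_y ∧ min_x ≠ max_x then "vertical rectangle"
        else "polygon"
      [("shape", shape)]
  | _, _, _, _ => []  -- unreachable under Pre_ (Python raises ValueError on an empty list)

-- ===== PRECONDITION & SPEC =====
-- Pre_ excludes only the empty list, on which Python A raises ValueError (min of an empty sequence).
def Pre_identify_shapes (coordinates : List (Int × Int)) : Prop := coordinates ≠ []
instance (coordinates : List (Int × Int)) : Decidable (Pre_identify_shapes coordinates) := by
  unfold Pre_identify_shapes; infer_instance

def pvWitness_identify_shapes : (List (Int × Int)) := [(0, 0), (0, 1), (1, 0), (1, 1)]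

def Spec_identify_shapes (coordinates : List (Int × Int)) (out : List (String × String)) : Prop := out = identify_shapes_alt coordinates
instance (coordinates : List (Int × Int)) (out : List (String × String)) : Decidable (Spec_identify_shapes coordinates out) := by unfold Spec_identify_shapes; infer_instance

-- ===== CLAIM (what is proved, stated in full; the proofs are below) =====
def Claim_equal_identify_shapes : Prop := ∀ (coordinates : List (Int × Int)), Dom_identify_shapes coordinates → Pre_identify_shapes coordinates → Spec_identify_shapes coordinates (identify_shapes coordinates)

-- ===== LEMMAS AND PROOFS =====

-- min over coords with a key and min over the projected list pick the same value
theorem pv_min_val_eq {α : Type} (f : α → Int) (l : List α) {a : α} {b : Int}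
    (ha : PySem.List.min? l f = some a)
    (hb : PySem.List.min? (l.map f) (fun v => v) = some b) : f a = b := by
  obtain ⟨c, hc, rfl⟩ := List.mem_map.mp (PySem.List.min?_mem hb)
  exact le_antisymm (PySem.List.min?_isMin ha c hc)
    (PySem.List.min?_isMin hb (f a) (List.mem_map.mpr ⟨a, PySem.List.min?_mem ha, rfl⟩))

theorem pv_max_val_eq {α : Type} (f : α → Int) (l : List α) {a : α} {b : Int}
    (ha : PySem.List.max? l f = some a)
    (hb : PySem.List.max? (l.map f) (fun v => v) = some b) : f a = b := by
  obtain ⟨c, hc, rfl⟩ := List.mem_map.mp (PySem.List.max?_mem hb)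
  exact le_antisymm
    (PySem.List.max?_isMax hb (f a) (List.mem_map.mpr ⟨a, PySem.List.max?_mem ha, rfl⟩))
    (PySem.List.max?_isMax ha c hc)

-- |set(l)| = |l.toFinset|
theorem pv_set_length {α : Type} [BEq α] [LawfulBEq α] [DecidableEq α] (l : List α) :
    (PySem.Set.ofList l).length = l.toFinset.card := by
  rw [List.card_toFinset]
  exact List.Perm.length_eq
    ((List.perm_ext_iff_of_nodup (PySem.Set.nodup_ofList l) l.nodup_dedup).mpr
      (fun a => by simp [PySem.Set.mem_ofList, List.mem_dedup]))

-- |set(l)| versus min/max of l: 1 distinct value iff min = max, ≥ 2 iff min ≠ max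
theorem pv_card_one_two (l : List Int) {mn mx : Int}
    (hmn : PySem.List.min? l (fun v => v) = some mn)
    (hmx : PySem.List.max? l (fun v => v) = some mx) :
    ((PySem.Set.ofList l).length = 1 ↔ mn = mx) ∧
    (2 ≤ (PySem.Set.ofList l).length ↔ mn ≠ mx) := by
  rw [pv_set_length]
  have hmnm : mn ∈ l := PySem.List.min?_mem hmn
  have h1 : 1 ≤ l.toFinset.card :=
    Finset.card_pos.mpr ⟨mn, List.mem_toFinset.mpr hmnm⟩
  have hup : mn = mx → l.toFinset.card ≤ 1 := by
    intro he
    have hss : l.toFinset ⊆ {mn} := by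
      intro y hy
      have hyl := List.mem_toFinset.mp hy
      have h5 := PySem.List.min?_isMin hmn y hyl
      have h6 := PySem.List.max?_isMax hmx y hyl
      simp only [Finset.mem_singleton]
      omega
    calc l.toFinset.card ≤ ({mn} : Finset Int).card := Finset.card_le_card hss
      _ = 1 := Finset.card_singleton mn
  have hlo : mn ≠ mx → 2 ≤ l.toFinset.card := by
    intro hne
    have : ({mn, mx} : Finset Int) ⊆ l.toFinset := by
      intro y hy
      rcases Finset.mem_insert.mp hy with rfl | hy
      · exact List.mem_toFinset.mpr hmnm
      · rcases Finset.mem_singleton.mp hy with rfl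
        exact List.mem_toFinset.mpr (PySem.List.max?_mem hmx)
    calc 2 = ({mn, mx} : Finset Int).card := (Finset.card_pair hne).symm
      _ ≤ l.toFinset.card := Finset.card_le_card this
  constructor
  · constructor
    · intro hc; by_contra hne; have := hlo hne; omega
    · intro he; have := hup he; omega
  · constructor
    · intro hc he; have := hup he; omega
    · exact hlo

-- the grid check is the distinct-count check
theorem pv_square_iff (coords : List (Int × Int)) (minx maxx miny maxy size : Int)
    (hminx : ∀ c ∈ coords, minx ≤ c.1) (hmaxx : ∀ c ∈ coords, c.1 ≤ maxx)
    (hminy : ∀ c ∈ coords, miny ≤ c.2) (hmaxy : ∀ c ∈ coords, c.2 ≤ maxy)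
    (hxle : minx ≤ maxx) (hyle : miny ≤ maxy)
    (hsz : size = max (maxx - minx) (maxy - miny) + 1) :
    (((PySem.List.pyRange minx (minx + size) 1).flatMap
        (fun r => (PySem.List.pyRange miny (miny + size) 1).map (fun c => (r, c)))).all
      (fun coord => decide (coord ∈ coords)) = true)
    ↔ ((PySem.Set.ofList coords).length : Int) = size * size := by
  have hsize : 1 ≤ size := by omega
  set G : Finset (Int × Int) :=
    (Finset.Ico minx (minx + size)) ×ˢ (Finset.Ico miny (miny + size)) with hG
  have hmemgrid : ∀ p : Int × Int,
      p ∈ (PySem.List.pyRange minx (minx + size) 1).flatMap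
        (fun r => (PySem.List.pyRange miny (miny + size) 1).map (fun c => (r, c))) ↔ p ∈ G := by
    rintro ⟨x, y⟩
    simp [List.mem_flatMap, List.mem_map, PySem.List.mem_pyRange_one, hG,
      Finset.mem_product, Finset.mem_Ico, Prod.ext_iff]
  have hSG : coords.toFinset ⊆ G := by
    intro p hp
    have hpl := List.mem_toFinset.mp hp
    have h1 := hminx p hpl
    have h2 := hmaxx p hpl
    have h3 := hminy p hpl
    have h4 := hmaxy p hpl
    simp only [hG, Finset.mem_product, Finset.mem_Ico]
    omega
  have hGcard : G.card = size.toNat * size.toNat := by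
    rw [hG, Finset.card_product, Int.card_Ico, Int.card_Ico]
    congr 1 <;> omega
  have hcast : ((size.toNat * size.toNat : Nat) : Int) = size * size := by
    push_cast
    rw [Int.toNat_of_nonneg (by omega)]
  rw [List.all_eq_true]
  constructor
  · intro hall
    have hGS : G ⊆ coords.toFinset := by
      intro p hp
      exact List.mem_toFinset.mpr (decide_eq_true_eq.mp (hall p ((hmemgrid p).mpr hp)))
    have : coords.toFinset = G := Finset.Subset.antisymm hSG hGS
    rw [pv_set_length, this, hGcard, hcast]
  · intro hcnt
    have hcard : G.card ≤ coords.toFinset.card := by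
      rw [pv_set_length] at hcnt
      rw [hGcard]
      have : ((coords.toFinset.card : Nat) : Int) = ((size.toNat * size.toNat : Nat) : Int) := by
        rw [hcast]; exact hcnt
      exact_mod_cast this.ge
    have hEq : coords.toFinset = G := Finset.eq_of_subset_of_card_le hSG hcard
    intro p hp
    have : p ∈ coords.toFinset := by rw [hEq]; exact (hmemgrid p).mp hp
    exact decide_eq_true (List.mem_toFinset.mp this)

-- ===== VERDICT (by name: the statement is the Claim_ definition above) =====
set_option maxHeartbeats 1600000 in
theorem identify_shapes_spec : Claim_equal_identify_shapes := by
  unfold Claim_equal_identify_shapes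
  intro coords _ hpre
  unfold Pre_identify_shapes at hpre
  unfold Spec_identify_shapes identify_shapes identify_shapes_alt is_square_submatrix
  dsimp only
  rcases h1 : PySem.List.min? coords (fun x => x.1) with _ | mnx
  · exact absurd ((PySem.List.min?_eq_none_iff _ _).mp h1) hpre
  rcases h2 : PySem.List.max? coords (fun x => x.1) with _ | mxx
  · exact absurd ((PySem.List.max?_eq_none_iff _ _).mp h2) hpre
  rcases h3 : PySem.List.min? coords (fun x => x.2) with _ | mny
  · exact absurd ((PySem.List.min?_eq_none_iff _ _).mp h3) hpre
  rcases h4 : PySem.List.max? coords (fun x => x.2) with _ | mxy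
  · exact absurd ((PySem.List.max?_eq_none_iff _ _).mp h4) hpre
  have hmapne : coords.map (fun c => c.1) ≠ [] := by
    simpa using hpre
  have hmapne2 : coords.map (fun c => c.2) ≠ [] := by
    simpa using hpre
  rcases g1 : PySem.List.min? (coords.map (fun c => c.1)) (fun v => v) with _ | bx
  · exact absurd ((PySem.List.min?_eq_none_iff _ _).mp g1) hmapne
  rcases g2 : PySem.List.max? (coords.map (fun c => c.1)) (fun v => v) with _ | cx
  · exact absurd ((PySem.List.max?_eq_none_iff _ _).mp g2) hmapne
  rcases g3 : PySem.List.min? (coords.map (fun c => c.2)) (fun v => v) with _ | by_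
  · exact absurd ((PySem.List.min?_eq_none_iff _ _).mp g3) hmapne2
  rcases g4 : PySem.List.max? (coords.map (fun c => c.2)) (fun v => v) with _ | cy
  · exact absurd ((PySem.List.max?_eq_none_iff _ _).mp g4) hmapne2
  have ebx : mnx.1 = bx := pv_min_val_eq _ _ h1 g1
  have ecx : mxx.1 = cx := pv_max_val_eq _ _ h2 g2
  have eby : mny.2 = by_ := pv_min_val_eq _ _ h3 g3
  have ecy : mxy.2 = cy := pv_max_val_eq _ _ h4 g4
  subst ebx; subst ecx; subst eby; subst ecy
  have hxle : mnx.1 ≤ mxx.1 := by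
    rcases List.exists_mem_of_ne_nil coords hpre with ⟨c, hc⟩
    exact le_trans (PySem.List.min?_isMin h1 c hc) (PySem.List.max?_isMax h2 c hc)
  have hyle : mny.2 ≤ mxy.2 := by
    rcases List.exists_mem_of_ne_nil coords hpre with ⟨c, hc⟩
    exact le_trans (PySem.List.min?_isMin h3 c hc) (PySem.List.max?_isMax h4 c hc)
  have hsq := pv_square_iff coords mnx.1 mxx.1 mny.2 mxy.2
    (max (mxx.1 - mnx.1) (mxy.2 - mny.2) + 1)
    (fun c hc => PySem.List.min?_isMin h1 c hc) (fun c hc => PySem.List.max?_isMax h2 c hc)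
    (fun c hc => PySem.List.min?_isMin h3 c hc) (fun c hc => PySem.List.max?_isMax h4 c hc)
    hxle hyle rfl
  have hcx := pv_card_one_two (coords.map (fun c => c.1)) g1 g2
  have hcy := pv_card_one_two (coords.map (fun c => c.2)) g3 g4
  have i2 : ((PySem.Set.ofList (coords.map (fun c => c.1))).length = 1 ∧
      2 ≤ (PySem.Set.ofList (coords.map (fun c => c.2))).length) ↔ (mnx.1 = mxx.1 ∧ mny.2 ≠ mxy.2) := by
    rw [hcx.1, hcy.2]
  have i3 : ((PySem.Set.ofList (coords.map (fun c => c.2))).length = 1 ∧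
      2 ≤ (PySem.Set.ofList (coords.map (fun c => c.1))).length) ↔ (mny.2 = mxy.2 ∧ mnx.1 ≠ mxx.1) := by
    rw [hcy.1, hcx.2]
  dsimp only
  rw [g1, g2, g3, g4]
  simp only [← hsq, ← i2, ← i3]
  split_ifs <;> rfl
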